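-- pv_equiv track=rewrite | github.com/MrBrantCode/unitest_baseline | mut_generate/mist_train_cf/cf_85959/solution.py | max_zeros
-- ===== SOURCE A (Python) =====
-- def max_zeros(start, end):
--     """
--     Calculate the total number of zeros in all binary representations of numbers
--     between start and end inclusive, and find the binary number with the maximum
--     number of zeros within the given range.
--
--     Args:
--     start (int): The start of the range (inclusive).
--     end (int): The end of the range (inclusive).
--
--     Returns:
--     tuple: A tuple containing the maximum number of zeros and the binary number
--            with the maximum number of zeros.
--     """
--     max_zeros = -1
--     max_binary = 0
--     for i in range(start, end+1):
--         binary = bin(i)[2:]  # remove '0b' prefix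
--         num_zeros = binary.count('0')
--         if num_zeros > max_zeros:
--             max_zeros = num_zeros
--             max_binary = binary
--     return max_zeros, max_binary
-- ===== SOURCE B (Python) =====
-- def max_zeros(start, end):
--     def zeros(i):
--         n = abs(i)
--         return 1 if n == 0 else n.bit_length() - n.bit_count()
--     best = max(map(zeros, range(start, end + 1)))
--     for i in range(start, end + 1):
--         if zeros(i) == best:
--             return best, bin(i)[2:]
-- ===== Notes on version B (the rewrite author's own statement) =====
-- stated objective: alternative
-- what changed: B computes each number's zero count arithmetically as bit_length()-bit_count() instead of building a binary string and counting characters, and finds the winner by taking the maximum first and then scanning for its first attainer instead of tracking a running best pair; Pre_ excludes empty ranges (start > end), where A returns -1 paired with the int 0 in the string position.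
-- outside the precondition, e.g. on max_zeros(1, 0): A returns (-1, 0), B raises ValueError
import Mathlib
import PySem

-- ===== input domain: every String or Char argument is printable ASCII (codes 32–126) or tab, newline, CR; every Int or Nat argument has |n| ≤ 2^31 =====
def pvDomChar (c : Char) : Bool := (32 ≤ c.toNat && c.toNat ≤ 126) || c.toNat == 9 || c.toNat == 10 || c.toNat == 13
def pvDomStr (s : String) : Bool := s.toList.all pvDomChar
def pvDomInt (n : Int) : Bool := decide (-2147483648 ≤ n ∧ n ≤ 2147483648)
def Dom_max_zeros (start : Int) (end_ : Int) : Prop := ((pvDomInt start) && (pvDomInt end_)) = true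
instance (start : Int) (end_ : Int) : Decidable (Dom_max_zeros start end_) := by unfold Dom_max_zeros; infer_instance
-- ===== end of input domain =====

-- B replaces A's per-number string building with arithmetic bit counts and a max-then-first-match
-- scan; return values agree on every nonempty range.

-- ===== PORT A =====
-- Python A: max_binary starts as the int 0; it is overwritten on the first iteration of any
-- nonempty range (num_zeros ≥ 0 > -1), so inside Pre_ the "" placeholder below is never returned.
def max_zeros (start : Int) (end_ : Int) : Int × String :=
  (PySem.List.pyRange start (end_ + 1) 1).foldl
    (fun acc i =>
      let binary := PySem.Str.slice (PySem.Int.pyBin i) (some 2) none   -- bin(i)[2:]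
      let num_zeros : Int := (PySem.Str.count binary "0" : Int)
      if num_zeros > acc.1 then (num_zeros, binary) else acc)
    (-1, "")

-- ===== PORT B =====
-- zeros(i) from Source B: n = abs(i); 1 if n == 0 else n.bit_length() - n.bit_count()
def zerosB (i : Int) : Int :=
  let n := |i|
  if n = 0 then 1 else (PySem.Int.bitLength n : Int) - (PySem.Int.bitCount n : Int)

def max_zeros_alt (start : Int) (end_ : Int) : Int × String :=
  match PySem.List.pyRange start (end_ + 1) 1 with
  | [] => (-1, "")        -- Python B: max() raises ValueError on an empty range; outside Pre_
  | x :: xs =>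
    -- best = max(map(zeros, range(start, end + 1)))  (max of a nonempty sequence = running max)
    let best := xs.foldl (fun m i => max m (zerosB i)) (zerosB x)
    -- for i in range(start, end + 1): if zeros(i) == best: return best, bin(i)[2:]
    match (x :: xs).find? (fun i => zerosB i == best) with
    | some w => (best, PySem.Str.slice (PySem.Int.pyBin w) (some 2) none)
    | none => (-1, "")    -- unreachable: the maximum is attained by some element

-- ===== PRECONDITION & SPEC =====
-- Pre_ excludes exactly the empty ranges (start > end): there Python A returns -1 paired with
-- the int 0, not a string, so A's value is outside the declared return type.
def Pre_max_zeros (start : Int) (end_ : Int) : Prop := start ≤ end_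
instance (start : Int) (end_ : Int) : Decidable (Pre_max_zeros start end_) := by unfold Pre_max_zeros; infer_instance
def pvWitness_max_zeros : Int × Int := (0, 5)

def Spec_max_zeros (start : Int) (end_ : Int) (out : Int × String) : Prop := out = max_zeros_alt start end_
instance (start : Int) (end_ : Int) (out : Int × String) : Decidable (Spec_max_zeros start end_ out) := by unfold Spec_max_zeros; infer_instance

-- ===== CLAIM (what is proved, stated in full; the proofs are below) =====
def Claim_equal_max_zeros : Prop := ∀ (start : Int) (end_ : Int), Dom_max_zeros start end_ → Pre_max_zeros start end_ → Spec_max_zeros start end_ (max_zeros start end_)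

-- ===== LEMMAS AND PROOFS =====

-- Python's s.count(c) for a one-character needle is the character count.
theorem chars_count_go_single (c : Char) : ∀ (fuel : Nat) (l : List Char) (acc : Nat),
    l.length ≤ fuel → PySem.Chars.count.go [c] fuel l acc = acc + l.count c := by
  intro fuel
  induction fuel with
  | zero =>
    intro l acc h
    have : l = [] := by cases l <;> simp_all
    subst this; simp [PySem.Chars.count.go]
  | succ f ih =>
    intro l acc h
    cases l with
    | nil => simp [PySem.Chars.count.go]
    | cons x t =>
      simp only [PySem.Chars.count.go]
      by_cases hx : c = x
      · subst hx
        rw [if_pos (by simp [List.isPrefixOf])]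
        simp only [List.length_cons] at h
        simp [ih _ _ (by simpa using h)]
        omega
      · rw [if_neg (by simp [List.isPrefixOf]; exact fun hh => hx (by simpa using hh))]
        simp only [List.length_cons] at h
        simp [ih t acc (by omega), Ne.symm hx]

theorem chars_count_single (l : List Char) (c : Char) :
    PySem.Chars.count l [c] = l.count c := by
  simp [PySem.Chars.count, chars_count_go_single c l.length l 0 le_rfl]

-- the binary digit list of n, MSB first ([] for n = 0)
def binDigits : Nat → List Char
  | 0 => []
  | (n+1) => binDigits ((n+1)/2) ++ [Nat.digitChar ((n+1) % 2)]
decreasing_by exact Nat.div_lt_self (Nat.succ_pos n) (by omega)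

theorem toDigitsCore_two_eq : ∀ (fuel n : Nat) (ds : List Char), n < fuel → 0 < n →
    Nat.toDigitsCore 2 fuel n ds = binDigits n ++ ds := by
  intro fuel
  induction fuel with
  | zero => omega
  | succ f ih =>
    intro n ds h hn
    simp only [Nat.toDigitsCore]
    by_cases h2 : n / 2 = 0
    · have : n = 1 := by omega
      subst this
      norm_num
      rw [show binDigits 1 = ['1'] from by simp [binDigits]; rfl]
      rfl
    · rw [if_neg h2, ih _ _ (by omega) (by omega)]
      obtain ⟨m, rfl⟩ : ∃ m, n = m + 1 := ⟨n - 1, by omega⟩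
      conv_rhs => rw [binDigits]
      simp

theorem toDigits_two (n : Nat) (hn : 0 < n) : Nat.toDigits 2 n = binDigits n := by
  unfold Nat.toDigits
  rw [toDigitsCore_two_eq (n+1) n [] (by omega) hn, List.append_nil]

theorem count_binDigits : ∀ n : Nat, 0 < n →
    (binDigits n).count '0' + PySem.Int.bitCount (n : Int) = PySem.Int.bitLength (n : Int) := by
  intro n
  induction n using Nat.strong_induction_on with
  | _ n ih =>
    intro hn
    obtain ⟨m, rfl⟩ : ∃ m, n = m + 1 := ⟨n - 1, by omega⟩
    rw [binDigits, List.count_append,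
        PySem.Int.bitLength_natCast (m := m+1) (by omega), PySem.Int.bitCount_natCast (m := m+1) (by omega)]
    by_cases h2 : (m+1) / 2 = 0
    · have hm : m = 0 := by omega
      subst hm
      simp [binDigits, PySem.Int.bitLength_zero, PySem.Int.bitCount_zero]
      rfl
    · have ihh := ih ((m+1)/2) (by omega) (by omega)
      rcases Nat.mod_two_eq_zero_or_one (m+1) with hp | hp <;> rw [hp]
      · have hc : ([Nat.digitChar 0]).count '0' = 1 := by decide
        omega
      · have hc : ([Nat.digitChar 1]).count '0' = 0 := by decide
        omega

-- bin(i)[2:] drops exactly the first two characters of the "0b…"/"-0b…" rendering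
theorem drop2 (i : Int) :
    (PySem.Str.slice (PySem.Int.pyBin i) (some 2) none).toList
      = (PySem.Int.toBinChars0b i).drop 2 := by
  rw [PySem.Str.toList_slice, PySem.Chars.slice_eq_listSlice, PySem.Int.toList_pyBin,
      show ((2:Int)) = ((2:Nat):Int) from rfl, PySem.List.slice_from_natCast]

-- the zero count A reads off the string equals B's arithmetic zero count
theorem nz_eq (i : Int) :
    ((PySem.Str.count (PySem.Str.slice (PySem.Int.pyBin i) (some 2) none) "0" : Nat) : Int) = zerosB i := by
  rw [PySem.Str.count_eq, show ("0" : String).toList = ['0'] from rfl, chars_count_single, drop2]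
  by_cases h0 : i = 0
  · subst h0; decide
  by_cases h : i < 0
  · have habs : |i| = (i.natAbs : Int) := Int.abs_eq_natAbs i
    have hpos : 0 < i.natAbs := by omega
    have hk := count_binDigits i.natAbs hpos
    have hle := PySem.Int.bitCount_le_bitLength ((i.natAbs : Nat) : Int)
    simp only [PySem.Int.toBinChars0b, if_pos h, List.drop, toDigits_two i.natAbs hpos]
    rw [List.count_cons_of_ne (by decide)]
    simp only [zerosB, habs]
    rw [if_neg (by omega)]
    omega
  · have habs : |i| = (i.natAbs : Int) := Int.abs_eq_natAbs i
    have htn : i.toNat = i.natAbs := by omega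
    have hpos : 0 < i.natAbs := by omega
    have hk := count_binDigits i.natAbs hpos
    have hle := PySem.Int.bitCount_le_bitLength ((i.natAbs : Nat) : Int)
    simp only [PySem.Int.toBinChars0b, if_neg h, List.drop, htn, toDigits_two i.natAbs hpos]
    simp only [zerosB, habs]
    rw [if_neg (by omega)]
    omega

theorem zerosB_nonneg (i : Int) : 0 ≤ zerosB i := by
  simp only [zerosB]
  split_ifs with h
  · norm_num
  · have := PySem.Int.bitCount_le_bitLength |i|
    omega

-- A's winner: the first element of x :: xs to set a new strict maximum, scanning left to right
def selB (x : Int) (xs : List Int) : Int :=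
  xs.foldl (fun w i => if zerosB i > zerosB w then i else w) x

theorem foldA_eq (xs : List Int) : ∀ (x : Int),
    xs.foldl (fun (acc : Int × String) i =>
        if zerosB i > acc.1 then (zerosB i, PySem.Str.slice (PySem.Int.pyBin i) (some 2) none) else acc)
      (zerosB x, PySem.Str.slice (PySem.Int.pyBin x) (some 2) none)
    = (zerosB (selB x xs), PySem.Str.slice (PySem.Int.pyBin (selB x xs)) (some 2) none) := by
  induction xs with
  | nil => intro x; simp [selB]
  | cons y ys ih =>
    intro x
    simp only [List.foldl_cons, selB, selB] at *
    by_cases h : zerosB y > zerosB x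
    · rw [if_pos h, if_pos h]; exact ih y
    · rw [if_neg h, if_neg h]; exact ih x

theorem best_eq (xs : List Int) : ∀ (x : Int),
    xs.foldl (fun m i => max m (zerosB i)) (zerosB x) = zerosB (selB x xs) := by
  induction xs with
  | nil => intro x; simp [selB]
  | cons y ys ih =>
    intro x
    simp only [List.foldl_cons, selB] at *
    by_cases h : zerosB y > zerosB x
    · rw [if_pos h, max_eq_right h.le]; exact ih y
    · rw [if_neg h, max_eq_left (not_lt.mp h)]; exact ih x

theorem selB_cases (xs : List Int) : ∀ (x : Int),
    selB x xs = x ∨ zerosB x < zerosB (selB x xs) := by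
  induction xs with
  | nil => intro x; left; rfl
  | cons y ys ih =>
    intro x
    simp only [selB, List.foldl_cons] at *
    by_cases h : zerosB y > zerosB x
    · rw [if_pos h]
      rcases ih y with h1 | h1
      · right; rw [h1]; exact h
      · right; omega
    · rw [if_neg h]; exact ih x

theorem find_sel (xs : List Int) : ∀ (x : Int),
    (x :: xs).find? (fun i => zerosB i == zerosB (selB x xs)) = some (selB x xs) := by
  induction xs with
  | nil =>
    intro x
    simp [selB, List.find?]
  | cons y ys ih =>
    intro x
    have hsel : selB x (y :: ys) = selB (if zerosB y > zerosB x then y else x) ys := by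
      simp only [selB, List.foldl_cons]
    by_cases hx : zerosB x = zerosB (selB x (y :: ys))
    · have hx' : selB x (y :: ys) = x := by
        rcases selB_cases (y :: ys) x with h1 | h1
        · exact h1
        · omega
      rw [List.find?_cons_of_pos (by simp [hx])]
      rw [hx']
    · rw [List.find?_cons_of_neg (by simp [hx])]
      by_cases hy : zerosB y > zerosB x
      · rw [hsel, if_pos hy] at *
        exact ih y
      · rw [hsel, if_neg hy] at *
        have hlt : zerosB x < zerosB (selB x ys) := by
          rcases selB_cases ys x with h1 | h1
          · rw [h1] at hx; exact absurd rfl hx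
          · exact h1
        have ihx := ih x
        rw [List.find?_cons_of_neg (by simp; omega)] at ihx
        rw [List.find?_cons_of_neg (by simp; omega)]
        exact ihx

-- ===== VERDICT (by name: the statement is the Claim_ definition above) =====
theorem max_zeros_spec : Claim_equal_max_zeros := by
  intro start end_ _ hpre
  unfold Spec_max_zeros
  have hcons : PySem.List.pyRange start (end_ + 1) 1
      = start :: PySem.List.pyRange (start + 1) (end_ + 1) 1 :=
    PySem.List.pyRange_one_cons (by exact lt_of_le_of_lt hpre (by omega))
  set rest := PySem.List.pyRange (start + 1) (end_ + 1) 1 with hrest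
  have hfun : (fun (acc : Int × String) (i : Int) =>
        let binary := PySem.Str.slice (PySem.Int.pyBin i) (some 2) none
        let num_zeros : Int := (PySem.Str.count binary "0" : Nat)
        if num_zeros > acc.1 then (num_zeros, binary) else acc)
      = (fun (acc : Int × String) i =>
          if zerosB i > acc.1 then (zerosB i, PySem.Str.slice (PySem.Int.pyBin i) (some 2) none) else acc) := by
    funext acc i
    show (if ((PySem.Str.count (PySem.Str.slice (PySem.Int.pyBin i) (some 2) none) "0" : Nat) : Int) > acc.1
          then (((PySem.Str.count (PySem.Str.slice (PySem.Int.pyBin i) (some 2) none) "0" : Nat) : Int),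
                PySem.Str.slice (PySem.Int.pyBin i) (some 2) none) else acc) = _
    rw [nz_eq]
  have halt : max_zeros_alt start end_
      = (match (start :: rest).find? (fun i =>
            zerosB i == rest.foldl (fun m i => max m (zerosB i)) (zerosB start)) with
         | some w => (rest.foldl (fun m i => max m (zerosB i)) (zerosB start),
                      PySem.Str.slice (PySem.Int.pyBin w) (some 2) none)
         | none => (-1, "")) := by
    rw [max_zeros_alt, hcons]
  rw [max_zeros, hcons, hfun, List.foldl_cons, halt]
  rw [if_pos (by have := zerosB_nonneg start; simp; omega)]
  rw [foldA_eq rest start, best_eq rest start, find_sel rest start]
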